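-- pv_equiv track=rewrite | github.com/PetrosTepoyan/Tumo_Matrix_Task | TUMO Matrix Task.py | solution_0
-- ===== SOURCE A (Python) =====
-- def solution_0(A):
--     # write your code in Python 3.6
--     n = len(A)
--     m = [[0 for i in range(n)] for j in range(n)]
--     for i in range(0, n):
--         m[i][i] = A[i]
--
--     coord = ((i, i + d) for d in range(1, n) for i in range(0, n - d))
--     max_ = 1
--     for k in coord:
--         i = k[0]
--         j = k[1]
--         d = j - i + 1
--         m[i][j] = min(m[i][j - 1], m[i + 1][j])
--         min_ = min(m[i][j], d)
--         if min_ > max_: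
--             max_ = min_
--     return max_
--     pass
-- ===== SOURCE B (Python) =====
-- def solution_0(A):
--     # Row-wise running-minimum scan: no n x n matrix, O(1) extra space.
--     n = len(A)
--     best = 1
--     for i in range(n):
--         cur = A[i]
--         for j in range(i + 1, n):
--             cur = min(cur, A[j])
--             cand = min(cur, j - i + 1)
--             if cand > best:
--                 best = cand
--     return best
-- ===== Notes on version B (the rewrite author's own statement) =====
-- stated objective: simpler
-- what changed: Replaces A's O(n^2)-memory interval-minimum DP table filled diagonal by diagonal with a direct row-wise running-minimum scan over each start index, using O(1) extra space and no matrix.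
import Mathlib
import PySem

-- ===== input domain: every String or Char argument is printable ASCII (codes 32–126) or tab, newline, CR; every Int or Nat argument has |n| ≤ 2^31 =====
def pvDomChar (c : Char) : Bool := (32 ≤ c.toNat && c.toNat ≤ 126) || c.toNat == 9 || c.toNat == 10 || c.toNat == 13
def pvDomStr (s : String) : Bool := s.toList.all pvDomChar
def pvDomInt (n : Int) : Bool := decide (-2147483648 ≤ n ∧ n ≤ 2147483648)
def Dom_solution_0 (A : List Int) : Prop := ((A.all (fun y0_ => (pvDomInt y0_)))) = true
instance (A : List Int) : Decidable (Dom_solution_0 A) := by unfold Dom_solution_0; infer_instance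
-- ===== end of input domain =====

-- B replaces A's n×n interval-minimum DP table with a row-wise running-minimum scan
-- using O(1) extra space (objective: simpler; same return value on every input).

-- ===== PORT A =====
-- m[i][j] access/update on the list-of-lists matrix (indices are the loop's
-- nonnegative range values, always in range in A, so getD/toNat is exact here)
def pvGet2 (m : List (List Int)) (i j : Int) : Int :=
  (m.getD i.toNat []).getD j.toNat 0

def pvSet2 (m : List (List Int)) (i j : Int) (v : Int) : List (List Int) :=
  m.set i.toNat ((m.getD i.toNat []).set j.toNat v)

def solution_0 (A : List Int) : Int :=
  let n : Int := A.length
  let m0 : List (List Int) :=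
    (PySem.List.pyRange 0 n 1).map (fun _ => (PySem.List.pyRange 0 n 1).map (fun _ => (0 : Int)))
  let m1 := (PySem.List.pyRange 0 n 1).foldl
    (fun m i => pvSet2 m i i (PySem.List.pyGetD A i 0)) m0
  let coord := (PySem.List.pyRange 1 n 1).flatMap
    (fun d => (PySem.List.pyRange 0 (n - d) 1).map (fun i => (i, i + d)))
  let res := coord.foldl (fun (s : List (List Int) × Int) k =>
      let i := k.1
      let j := k.2
      let d := j - i + 1
      let v := min (pvGet2 s.1 i (j - 1)) (pvGet2 s.1 (i + 1) j)
      let m' := pvSet2 s.1 i j v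
      let mn := min v d
      (m', if mn > s.2 then mn else s.2)) (m1, 1)
  res.2

-- ===== PORT B =====
def solution_0_alt (A : List Int) : Int :=
  let n : Int := A.length
  (PySem.List.pyRange 0 n 1).foldl (fun best i =>
    ((PySem.List.pyRange (i + 1) n 1).foldl (fun (s : Int × Int) j =>
        let cur := min s.1 (PySem.List.pyGetD A j 0)
        let cand := min cur (j - i + 1)
        (cur, if cand > s.2 then cand else s.2))
      (PySem.List.pyGetD A i 0, best)).2) 1

-- ===== PRECONDITION & SPEC =====
def Spec_solution_0 (A : List Int) (out : Int) : Prop := out = solution_0_alt A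
instance (A : List Int) (out : Int) : Decidable (Spec_solution_0 A out) := by unfold Spec_solution_0; infer_instance

-- ===== CLAIM (what is proved, stated in full; the proofs are below) =====
def Claim_equal_solution_0 : Prop := ∀ (A : List Int), Dom_solution_0 A → Spec_solution_0 A (solution_0 A)

-- ===== LEMMAS AND PROOFS =====

-- minimum of A[i..i+g] (gap form)
def pvR (A : List Int) (i : Nat) : Nat → Int
  | 0 => A.getD i 0
  | g + 1 => min (pvR A i g) (A.getD (i + g + 1) 0)

-- the value min(min(A[i..i+g]), g+1) both programs accumulate
def pvC (A : List Int) (p : Nat × Nat) : Int := min (pvR A p.1 p.2) ((p.2 : Int) + 1)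

-- the (start, gap) pairs in A's diagonal order and in B's row order
def pvLA (n : Nat) : List (Nat × Nat) :=
  (List.range (n - 1)).flatMap (fun e => (List.range (n - 1 - e)).map (fun i => (i, e + 1)))

def pvLB (n : Nat) : List (Nat × Nat) :=
  (List.range n).flatMap (fun i => (List.range (n - 1 - i)).map (fun t => (i, t + 1)))

def pvMax (A : List Int) (b : Int) (l : List (Nat × Nat)) : Int :=
  l.foldl (fun acc p => max acc (pvC A p)) b

theorem pvR_merge (A : List Int) (i g : Nat) :
    min (pvR A i g) (pvR A (i + 1) g) = pvR A i (g + 1) := by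
  induction g generalizing i with
  | zero => simp [pvR]
  | succ g ih =>
    have h1 := ih i
    simp only [pvR] at h1 ⊢
    have e1 : i + (g + 1) + 1 = i + 1 + g + 1 := by omega
    rw [e1]
    omega

-- B's inner loop body, named for the proofs (defeq to the lambda in the port)
def pvStepB (A : List Int) (i : Int) (s : Int × Int) (j : Int) : Int × Int :=
  let cur := min s.1 (PySem.List.pyGetD A j 0)
  let cand := min cur (j - i + 1)
  (cur, if cand > s.2 then cand else s.2)

theorem pvStepB_inner (A : List Int) (i : Nat) :
    ∀ (t : Nat) (b : Int),
      (PySem.List.pyRange (↑i + 1) (↑i + 1 + ↑t) 1).foldl (pvStepB A ↑i)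
          (PySem.List.pyGetD A (↑i) 0, b)
        = (pvR A i t,
           ((List.range t).map (fun u => ((i, u + 1) : Nat × Nat))).foldl
             (fun acc p => max acc (pvC A p)) b) := by
  intro t
  induction t with
  | zero =>
    intro b
    simp [PySem.List.pyRange_one_eq_nil, PySem.List.pyGetD_natCast, pvR]
  | succ t ih =>
    intro b
    have hsplit : PySem.List.pyRange (↑i + 1) (↑i + 1 + ↑(t + 1)) 1
        = PySem.List.pyRange (↑i + 1) (↑i + 1 + ↑t) 1 ++ [(↑i + 1 + ↑t : Int)] := by
      rw [show ((↑i + 1 + ↑(t + 1) : Int)) = (↑i + 1 + ↑t) + 1 by push_cast; ring]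
      exact PySem.List.pyRange_one_succ_right (by omega)
    rw [hsplit, List.foldl_append, ih b, List.range_succ, List.map_append, List.foldl_append]
    simp only [List.foldl_cons, List.foldl_nil]
    have hidx : (↑i + 1 + ↑t : Int) = ((i + t + 1 : Nat) : Int) := by push_cast; ring
    have hget : PySem.List.pyGetD A (↑i + 1 + ↑t) 0 = A.getD (i + t + 1) 0 := by
      rw [hidx, PySem.List.pyGetD_natCast]
    have hlen : (↑i + 1 + ↑t - ↑i + 1 : Int) = (↑(t + 1) : Int) + 1 := by push_cast; ring
    simp only [pvStepB, hget, hlen]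
    rw [Prod.mk.injEq]
    refine ⟨by simp [pvR], ?_⟩
    simp only [List.map_cons, List.map_nil, List.foldl_cons, List.foldl_nil, pvC, pvR]
    split_ifs <;> omega

theorem sol_alt_eq (A : List Int) : solution_0_alt A = pvMax A 1 (pvLB A.length) := by
  have hB : solution_0_alt A
      = (PySem.List.pyRange 0 (A.length : Int) 1).foldl
          (fun best i => ((PySem.List.pyRange (i + 1) (A.length : Int) 1).foldl
            (pvStepB A i) (PySem.List.pyGetD A i 0, best)).2) 1 := rfl
  rw [hB, PySem.List.pyRange_zero_nat, List.foldl_map]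
  rw [pvMax, pvLB, List.flatMap_def, List.foldl_flatten, List.foldl_map]
  refine PySem.List.foldl_congr_mem _ _ _ _ ?_
  intro b i hi
  rw [List.mem_range] at hi
  rw [show ((A.length : Nat) : Int) = (↑i + 1 + ↑(A.length - 1 - i) : Int) by omega]
  rw [pvStepB_inner A i (A.length - 1 - i) b, List.foldl_map]

-- A's loop body and initial matrix, named for the proofs (defeq to the port)
def pvStepA (s : List (List Int) × Int) (k : Int × Int) : List (List Int) × Int :=
  let i := k.1
  let j := k.2
  let d := j - i + 1
  let v := min (pvGet2 s.1 i (j - 1)) (pvGet2 s.1 (i + 1) j)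
  let m' := pvSet2 s.1 i j v
  let mn := min v d
  (m', if mn > s.2 then mn else s.2)

def pvM0 (A : List Int) : List (List Int) :=
  (PySem.List.pyRange 0 (A.length : Int) 1).map
    (fun _ => (PySem.List.pyRange 0 (A.length : Int) 1).map (fun _ => (0 : Int)))

def pvM1 (A : List Int) : List (List Int) :=
  (PySem.List.pyRange 0 (A.length : Int) 1).foldl
    (fun m i => pvSet2 m i i (PySem.List.pyGetD A i 0)) (pvM0 A)

def pvShape (M : List (List Int)) (n : Nat) : Prop :=
  M.length = n ∧ ∀ r ∈ M, r.length = n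

-- after processing all diagonals of gap ≤ k, entries with gap ≤ k hold the range minimum
def pvInv (A : List Int) (M : List (List Int)) (k : Nat) : Prop :=
  pvShape M A.length ∧
    ∀ i j : Nat, j < A.length → i ≤ j → j - i ≤ k → pvGet2 M ↑i ↑j = pvR A i (j - i)

theorem pvGet2_coe (M : List (List Int)) (i j : Nat) :
    pvGet2 M ↑i ↑j = (M.getD i []).getD j 0 := by simp [pvGet2]

theorem pvSet2_coe (M : List (List Int)) (i j : Nat) (v : Int) :
    pvSet2 M ↑i ↑j v = M.set i ((M.getD i []).set j v) := by simp [pvSet2]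

theorem pvRow_len {M : List (List Int)} {n i : Nat} (h : pvShape M n) (hi : i < n) :
    (M.getD i []).length = n := by
  obtain ⟨h1, h2⟩ := h
  have hlt : i < M.length := by omega
  rw [List.getD_eq_getElem?_getD, List.getElem?_eq_getElem hlt]
  exact h2 _ (List.getElem_mem hlt)

theorem pvShape_set2 {M : List (List Int)} {n : Nat} (i j : Nat) (v : Int)
    (h : pvShape M n) (hi : i < n) : pvShape (pvSet2 M ↑i ↑j v) n := by
  obtain ⟨h1, h2⟩ := h
  refine ⟨by simp [pvSet2, h1], ?_⟩
  intro r hr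
  rw [pvSet2_coe] at hr
  rcases List.mem_or_eq_of_mem_set hr with hmem | heq
  · exact h2 r hmem
  · subst heq
    rw [List.length_set]
    exact pvRow_len ⟨h1, h2⟩ hi

theorem pvGet2_set2_self {M : List (List Int)} {n : Nat} (i j : Nat) (v : Int)
    (h : pvShape M n) (hi : i < n) (hj : j < n) :
    pvGet2 (pvSet2 M ↑i ↑j v) ↑i ↑j = v := by
  have hrow : (M.getD i []).length = n := pvRow_len h hi
  have hlt : i < M.length := by
    have := h.1; omega
  rw [pvSet2_coe, pvGet2_coe]
  have hrowset : (M.set i ((M.getD i []).set j v)).getD i [] = (M.getD i []).set j v := by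
    rw [List.getD_eq_getElem?_getD, List.getElem?_set, if_pos rfl, if_pos hlt]; rfl
  rw [hrowset, List.getD_eq_getElem?_getD, List.getElem?_set, if_pos rfl,
    if_pos (by omega : j < (M.getD i []).length)]
  rfl

theorem pvGet2_set2_ne {M : List (List Int)} (i j i' j' : Nat) (v : Int)
    (hne : i ≠ i' ∨ j ≠ j') :
    pvGet2 (pvSet2 M ↑i ↑j v) ↑i' ↑j' = pvGet2 M ↑i' ↑j' := by
  rw [pvSet2_coe, pvGet2_coe, pvGet2_coe]
  rcases eq_or_ne i i' with rfl | hii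
  · have hjj : j ≠ j' := by tauto
    by_cases hlt : i < M.length
    · have hrowset : (M.set i ((M.getD i []).set j v)).getD i [] = (M.getD i []).set j v := by
        rw [List.getD_eq_getElem?_getD, List.getElem?_set, if_pos rfl, if_pos hlt]; rfl
      rw [hrowset, List.getD_eq_getElem?_getD, List.getElem?_set, if_neg hjj,
        ← List.getD_eq_getElem?_getD]
    · rw [List.set_eq_of_length_le (by omega)]
  · have hrow : (M.set i ((M.getD i []).set j v)).getD i' [] = M.getD i' [] := by
      rw [List.getD_eq_getElem?_getD, List.getElem?_set, if_neg hii,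
        ← List.getD_eq_getElem?_getD]
    rw [hrow]

theorem pvM0_shape (A : List Int) : pvShape (pvM0 A) A.length := by
  constructor
  · simp [pvM0, PySem.List.length_pyRange_one]
  · intro r hr
    rw [pvM0, List.mem_map] at hr
    obtain ⟨_, _, rfl⟩ := hr
    simp [PySem.List.length_pyRange_one]

theorem pvDiag_aux (A : List Int) : ∀ t, t ≤ A.length →
    pvShape ((PySem.List.pyRange 0 ↑t 1).foldl
        (fun m i => pvSet2 m i i (PySem.List.pyGetD A i 0)) (pvM0 A)) A.length
    ∧ ∀ i : Nat, i < t →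
        pvGet2 ((PySem.List.pyRange 0 ↑t 1).foldl
          (fun m i => pvSet2 m i i (PySem.List.pyGetD A i 0)) (pvM0 A)) ↑i ↑i = A.getD i 0 := by
  intro t
  induction t with
  | zero =>
    intro _
    rw [show ((0 : Nat) : Int) = 0 from rfl, PySem.List.pyRange_one_eq_nil le_rfl]
    exact ⟨pvM0_shape A, fun i hi => absurd hi (Nat.not_lt_zero i)⟩
  | succ t ih =>
    intro ht
    obtain ⟨hsh, hget⟩ := ih (by omega)
    have hsplit : PySem.List.pyRange 0 (↑(t + 1) : Int) 1
        = PySem.List.pyRange 0 (↑t : Int) 1 ++ [(↑t : Int)] := by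
      rw [show ((↑(t + 1) : Int)) = (↑t : Int) + 1 by push_cast; ring]
      exact PySem.List.pyRange_one_succ_right (by omega)
    rw [hsplit, List.foldl_append, List.foldl_cons, List.foldl_nil]
    set M := (PySem.List.pyRange 0 (↑t : Int) 1).foldl
      (fun m i => pvSet2 m i i (PySem.List.pyGetD A i 0)) (pvM0 A) with hM
    constructor
    · exact pvShape_set2 t t _ hsh (by omega)
    · intro i hi
      rcases Nat.lt_or_ge i t with hlt | hge
      · rw [pvGet2_set2_ne t t i i _ (Or.inl (by omega))]
        exact hget i hlt
      · have hit : i = t := by omega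
        subst hit
        rw [PySem.List.pyGetD_natCast]
        exact pvGet2_set2_self i i _ hsh (by omega) (by omega)

theorem pvM1_inv (A : List Int) : pvInv A (pvM1 A) 0 := by
  obtain ⟨hsh, hget⟩ := pvDiag_aux A A.length le_rfl
  refine ⟨hsh, ?_⟩
  intro i j hj hij hgap
  have : i = j := by omega
  subst this
  simp only [Nat.sub_self, pvR]
  exact hget i hj

theorem pvDiagA (A : List Int) (d : Nat) (hd : 1 ≤ d) :
    ∀ (t : Nat), t + d ≤ A.length → ∀ (M : List (List Int)) (b : Int), pvInv A M (d - 1) →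
    ∃ M', ((PySem.List.pyRange 0 ↑t 1).map (fun i => (i, i + (↑d : Int)))).foldl pvStepA (M, b)
        = (M', ((List.range t).map (fun i => ((i, d) : Nat × Nat))).foldl
            (fun acc p => max acc (pvC A p)) b)
      ∧ pvShape M' A.length
      ∧ (∀ i j : Nat, j < A.length → i ≤ j → (j - i ≤ d - 1 ∨ (j - i = d ∧ i < t)) →
          pvGet2 M' ↑i ↑j = pvR A i (j - i)) := by
  intro t
  induction t with
  | zero =>
    intro _ M b hInv
    refine ⟨M, ?_, hInv.1, ?_⟩
    · rw [show ((0 : Nat) : Int) = 0 from rfl, PySem.List.pyRange_one_eq_nil le_rfl]; rfl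
    · intro i j hj hij hcond
      rcases hcond with h | h
      · exact hInv.2 i j hj hij h
      · omega
  | succ t ih =>
    intro ht M b hInv
    obtain ⟨M', hfold, hsh', hcorr'⟩ := ih (by omega) M b hInv
    have hsplit : PySem.List.pyRange 0 (↑(t + 1) : Int) 1
        = PySem.List.pyRange 0 (↑t : Int) 1 ++ [(↑t : Int)] := by
      rw [show ((↑(t + 1) : Int)) = (↑t : Int) + 1 by push_cast; ring]
      exact PySem.List.pyRange_one_succ_right (by omega)
    rw [hsplit, List.map_append, List.foldl_append, hfold]
    simp only [List.map_cons, List.map_nil, List.foldl_cons, List.foldl_nil]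
    -- the single step at i = t, j = t + d
    have hr1 : pvGet2 M' ((↑t : Int)) ((↑t : Int) + ↑d - 1) = pvR A t (d - 1) := by
      rw [show ((↑t : Int) + ↑d - 1) = ((t + (d - 1) : Nat) : Int) by push_cast; omega]
      have := hcorr' t (t + (d - 1)) (by omega) (by omega) (Or.inl (by omega))
      rwa [show t + (d - 1) - t = d - 1 by omega] at this
    have hr2 : pvGet2 M' ((↑t : Int) + 1) ((↑t : Int) + ↑d) = pvR A (t + 1) (d - 1) := by
      rw [show ((↑t : Int) + 1) = ((t + 1 : Nat) : Int) by push_cast; ring,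
        show ((↑t : Int) + ↑d) = ((t + d : Nat) : Int) by push_cast; ring]
      have := hcorr' (t + 1) (t + d) (by omega) (by omega) (Or.inl (by omega))
      rwa [show t + d - (t + 1) = d - 1 by omega] at this
    have hv : min (pvGet2 M' ((↑t : Int)) ((↑t : Int) + ↑d - 1))
        (pvGet2 M' ((↑t : Int) + 1) ((↑t : Int) + ↑d)) = pvR A t d := by
      rw [hr1, hr2]
      have := pvR_merge A t (d - 1)
      rwa [show d - 1 + 1 = d by omega] at this
    refine ⟨pvSet2 M' ↑t ((↑t : Int) + ↑d) (pvR A t d), ?_, ?_, ?_⟩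
    · simp only [pvStepA, hv]
      rw [Prod.mk.injEq]
      constructor
      · rfl
      · rw [List.range_succ, List.map_append, List.foldl_append]
        simp only [List.map_cons, List.map_nil, List.foldl_cons, List.foldl_nil, pvC]
        rw [show ((↑t : Int) + ↑d - ↑t + 1) = (↑d : Int) + 1 by ring]
        split_ifs <;> omega
    · rw [show ((↑t : Int) + ↑d) = ((t + d : Nat) : Int) by push_cast; ring]
      exact pvShape_set2 t (t + d) _ hsh' (by omega)
    · intro i j hj hij hcond
      rw [show ((↑t : Int) + ↑d) = ((t + d : Nat) : Int) by push_cast; ring]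
      rcases eq_or_ne i t with rfl | hne_i
      · rcases eq_or_ne j (i + d) with rfl | hne_j
        · rw [pvGet2_set2_self i (i + d) _ hsh' (by omega) (by omega)]
          rw [show i + d - i = d by omega]
        · rw [pvGet2_set2_ne i (i + d) i j _ (Or.inr (by omega))]
          refine hcorr' i j hj hij ?_
          rcases hcond with h | h
          · exact Or.inl h
          · omega
      · rw [pvGet2_set2_ne t (t + d) i j _ (Or.inl (by omega))]
        refine hcorr' i j hj hij ?_
        rcases hcond with h | h
        · exact Or.inl h
        · refine Or.inr ⟨h.1, ?_⟩
          rcases Nat.lt_or_ge i t with hlt | hge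
          · exact hlt
          · omega

theorem pvOuterA (A : List Int) : ∀ (e : Nat), e ≤ A.length - 1 →
    ∃ M', (PySem.List.pyRange 1 (1 + (↑e : Int)) 1).foldl
        (fun s d => ((PySem.List.pyRange 0 ((A.length : Int) - d) 1).map
          (fun i => (i, i + d))).foldl pvStepA s) (pvM1 A, 1)
      = (M', pvMax A 1 ((List.range e).flatMap
          (fun k => (List.range (A.length - 1 - k)).map (fun i => (i, k + 1)))))
      ∧ pvInv A M' e := by
  intro e
  induction e with
  | zero =>
    intro _
    refine ⟨pvM1 A, ?_, pvM1_inv A⟩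
    rw [show ((1 : Int) + ↑(0 : Nat)) = 1 by simp, PySem.List.pyRange_one_eq_nil le_rfl]
    rfl
  | succ e ih =>
    intro he
    obtain ⟨M', hfold, hInv⟩ := ih (by omega)
    have hsplit : PySem.List.pyRange 1 (1 + (↑(e + 1) : Int)) 1
        = PySem.List.pyRange 1 (1 + (↑e : Int)) 1 ++ [(1 + (↑e : Int))] := by
      rw [show ((1 : Int) + ↑(e + 1)) = (1 + (↑e : Int)) + 1 by push_cast; ring]
      exact PySem.List.pyRange_one_succ_right (by omega)
    rw [hsplit, List.foldl_append, hfold, List.foldl_cons, List.foldl_nil]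
    have hd1 : ((1 : Int) + ↑e) = ((e + 1 : Nat) : Int) := by push_cast; ring
    have hbound : ((A.length : Int) - ↑(e + 1 : Nat)) = ((A.length - (e + 1) : Nat) : Int) := by
      push_cast; omega
    rw [hd1, hbound]
    have hInv' : pvInv A M' ((e + 1) - 1) := by simpa using hInv
    obtain ⟨M'', hfold2, hsh'', hcorr''⟩ :=
      pvDiagA A (e + 1) (by omega) (A.length - (e + 1)) (by omega) M'
        (pvMax A 1 ((List.range e).flatMap
          (fun k => (List.range (A.length - 1 - k)).map (fun i => (i, k + 1))))) hInv'
    rw [hfold2]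
    refine ⟨M'', ?_, ?_⟩
    · rw [Prod.mk.injEq]
      refine ⟨rfl, ?_⟩
      simp only [pvMax]
      rw [List.range_succ, List.flatMap_append, List.foldl_append]
      simp only [List.flatMap_cons, List.flatMap_nil, List.append_nil]
      rw [show A.length - 1 - e = A.length - (e + 1) by omega]
    · refine ⟨hsh'', ?_⟩
      intro i j hj hij hgap
      rcases Nat.lt_or_ge (j - i) (e + 1) with hlt | hge
      · refine hcorr'' i j hj hij (Or.inl (by omega))
      · refine hcorr'' i j hj hij (Or.inr ⟨by omega, by omega⟩)

theorem sol_eq (A : List Int) : solution_0 A = pvMax A 1 (pvLA A.length) := by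
  have hA : solution_0 A
      = (((PySem.List.pyRange 1 (A.length : Int) 1).flatMap
          (fun d => (PySem.List.pyRange 0 ((A.length : Int) - d) 1).map
            (fun i => (i, i + d)))).foldl pvStepA (pvM1 A, 1)).2 := rfl
  rw [hA, List.flatMap_def, List.foldl_flatten, List.foldl_map]
  rcases Nat.eq_zero_or_pos A.length with h0 | hpos
  · rw [h0]
    rw [show ((0 : Nat) : Int) = 0 from rfl, PySem.List.pyRange_one_eq_nil (by omega)]
    simp [pvLA, pvMax]
  · obtain ⟨M', hfold, _⟩ := pvOuterA A (A.length - 1) le_rfl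
    rw [show ((1 : Int) + (↑(A.length - 1) : Int)) = ((A.length : Nat) : Int) by omega] at hfold
    rw [hfold]
    rfl

theorem mem_pvLA (n : Nat) (p : Nat × Nat) : p ∈ pvLA n ↔ 1 ≤ p.2 ∧ p.1 + p.2 < n := by
  obtain ⟨i, g⟩ := p
  simp only [pvLA, List.mem_flatMap, List.mem_range, List.mem_map, Prod.mk.injEq]
  constructor
  · rintro ⟨e, he, i', hi', rfl, rfl⟩; omega
  · rintro ⟨hg, hn⟩; exact ⟨g - 1, by omega, i, by omega, rfl, by omega⟩

theorem mem_pvLB (n : Nat) (p : Nat × Nat) : p ∈ pvLB n ↔ 1 ≤ p.2 ∧ p.1 + p.2 < n := by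
  obtain ⟨i, g⟩ := p
  simp only [pvLB, List.mem_flatMap, List.mem_range, List.mem_map, Prod.mk.injEq]
  constructor
  · rintro ⟨i', hi', t, ht, rfl, rfl⟩; omega
  · rintro ⟨hg, hn⟩; exact ⟨i, by omega, g - 1, by omega, rfl, by omega⟩

theorem nodup_pvLA (n : Nat) : (pvLA n).Nodup := by
  refine List.nodup_flatMap.2 ⟨fun e _ => ?_, ?_⟩
  · exact (List.nodup_range).map (fun a b h => by simpa using congrArg Prod.fst h)
  · refine List.Pairwise.imp ?_ (List.pairwise_lt_range)
    intro a b hab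
    refine List.disjoint_left.2 ?_
    rintro ⟨i, g⟩ h1 h2
    simp only [List.mem_map, Prod.mk.injEq] at h1 h2
    obtain ⟨_, _, _, h1⟩ := h1; obtain ⟨_, _, _, h2⟩ := h2; omega

theorem nodup_pvLB (n : Nat) : (pvLB n).Nodup := by
  refine List.nodup_flatMap.2 ⟨fun i _ => ?_, ?_⟩
  · exact (List.nodup_range).map (fun a b h => by simpa using congrArg Prod.snd h)
  · refine List.Pairwise.imp ?_ (List.pairwise_lt_range)
    intro a b hab
    refine List.disjoint_left.2 ?_
    rintro ⟨i, g⟩ h1 h2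
    simp only [List.mem_map, Prod.mk.injEq] at h1 h2
    obtain ⟨_, _, h1, _⟩ := h1; obtain ⟨_, _, h2, _⟩ := h2; omega

theorem perm_pvLA_pvLB (n : Nat) : (pvLA n).Perm (pvLB n) := by
  refine (List.perm_ext_iff_of_nodup (nodup_pvLA n) (nodup_pvLB n)).2 ?_
  intro p; rw [mem_pvLA, mem_pvLB]

theorem pvMax_perm (A : List Int) (b : Int) {l1 l2 : List (Nat × Nat)} (h : l1.Perm l2) :
    pvMax A b l1 = pvMax A b l2 :=
  h.foldl_eq' (fun x _ y _ z => by simp only [max_assoc, max_comm (pvC A x)]) b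

-- ===== VERDICT (by name: the statement is the Claim_ definition above) =====
theorem solution_0_spec : Claim_equal_solution_0 := by
  intro A _
  unfold Spec_solution_0
  rw [sol_eq, sol_alt_eq, pvMax_perm A 1 (perm_pvLA_pvLB A.length)]
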